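-- pv_equiv track=rewrite | github.com/SteveSobka/media-manglers | src/media_manglers/core/whisper_runtime.py | normalize_model_family
-- ===== SOURCE A (Python) =====
-- def normalize_model_family(model_name: str) -> str:
--     normalized = (model_name or "").strip().lower()
--     if normalized.endswith(".en"):
--         normalized = normalized[:-3]
--
--     for family in ("tiny", "base", "small", "medium", "large", "turbo"):
--         if normalized == family or normalized.startswith(family + "-") or normalized.startswith(family + ".") or normalized.startswith(family + "_"):
--             return family
--
--     return "default"
-- ===== SOURCE B (Python) =====
-- FAMILIES = frozenset({"tiny", "base", "small", "medium", "large", "turbo"})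
-- _SEPARATORS = "-._"
--
--
-- def normalize_model_family(model_name: str) -> str:
--     normalized = (model_name or "").strip().lower()
--     if normalized.endswith(".en"):
--         normalized = normalized[:-3]
--     chars = []
--     for ch in normalized:
--         if ch in _SEPARATORS:
--             break
--         chars.append(ch)
--     token = "".join(chars)
--     return token if token in FAMILIES else "default"
-- ===== Notes on version B (the rewrite author's own statement) =====
-- stated objective: alternative
-- what changed: Replaces A's loop over the six families with four startswith tests each by a single scan extracting the leading token before the first separator ('-','.','_') plus one frozenset membership lookup.
import Mathlib
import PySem

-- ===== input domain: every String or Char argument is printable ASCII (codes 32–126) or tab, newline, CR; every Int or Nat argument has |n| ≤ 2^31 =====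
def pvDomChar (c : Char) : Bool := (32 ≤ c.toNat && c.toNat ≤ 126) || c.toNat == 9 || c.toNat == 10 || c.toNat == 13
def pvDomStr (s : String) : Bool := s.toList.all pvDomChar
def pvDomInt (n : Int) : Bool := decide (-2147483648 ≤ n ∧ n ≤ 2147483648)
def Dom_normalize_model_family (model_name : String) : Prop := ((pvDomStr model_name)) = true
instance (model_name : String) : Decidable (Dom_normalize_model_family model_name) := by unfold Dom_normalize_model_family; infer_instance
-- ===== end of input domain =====

set_option maxRecDepth 8000

-- B replaces A's per-family startswith loop by a single scan for the leading token plus a set lookup; objective: alternative (same behaviour, no speed claim).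

-- ===== PORT A =====
-- the for-loop over the family tuple, returning the first matching family
def pvFamLoop (n : String) : List String → String
  | [] => "default"
  | f :: rest =>
    if (decide (n = f) || PySem.Str.startswith n (f ++ "-") || PySem.Str.startswith n (f ++ ".") || PySem.Str.startswith n (f ++ "_")) = true
    then f else pvFamLoop n rest

def normalize_model_family (model_name : String) : String :=
  let normalized := PySem.Str.lower (PySem.Str.strip model_name)
  let normalized := if PySem.Str.endswith normalized ".en" = true
    then PySem.Str.slice normalized none (some (-3)) else normalized
  pvFamLoop normalized ["tiny", "base", "small", "medium", "large", "turbo"]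

-- ===== PORT B =====
def pvIsSep (c : Char) : Bool := c = '-' || c = '.' || c = '_'

-- B's character loop with break: the prefix of the string before the first separator
def pvFirstToken : List Char → List Char
  | [] => []
  | c :: cs => if pvIsSep c then [] else c :: pvFirstToken cs

def normalize_model_family_alt (model_name : String) : String :=
  let normalized := PySem.Str.lower (PySem.Str.strip model_name)
  let normalized := if PySem.Str.endswith normalized ".en" = true
    then PySem.Str.slice normalized none (some (-3)) else normalized
  let token := String.ofList (pvFirstToken normalized.toList)
  if token ∈ (["tiny", "base", "small", "medium", "large", "turbo"] : List String) then token else "default"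

-- ===== PRECONDITION & SPEC =====
def Spec_normalize_model_family (model_name : String) (out : String) : Prop := out = normalize_model_family_alt model_name
instance (model_name : String) (out : String) : Decidable (Spec_normalize_model_family model_name out) := by unfold Spec_normalize_model_family; infer_instance

-- ===== CLAIM (what is proved, stated in full; the proofs are below) =====
def Claim_equal_normalize_model_family : Prop := ∀ (model_name : String), Dom_normalize_model_family model_name → Spec_normalize_model_family model_name (normalize_model_family model_name)

-- ===== LEMMAS AND PROOFS =====

-- firstToken hits f (separator-free) iff the string is f or extends f by a separator
lemma pvFT_eq_iff (n f : List Char) (hf : ∀ c ∈ f, pvIsSep c = false) :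
    pvFirstToken n = f ↔ (n = f ∨ ∃ c, pvIsSep c = true ∧ (f ++ [c]) <+: n) := by
  induction n generalizing f with
  | nil =>
    simp only [pvFirstToken]
    constructor
    · rintro rfl; exact Or.inl rfl
    · rintro (rfl | ⟨c, _, hp⟩)
      · rfl
      · rcases hp with ⟨t, ht⟩
        exact absurd ht.symm (by simp)
  | cons c cs ih =>
    simp only [pvFirstToken]
    by_cases hc : pvIsSep c = true
    · simp only [if_pos hc]
      constructor
      · rintro rfl
        exact Or.inr ⟨c, hc, by simp⟩
      · rintro (rfl | ⟨d, hd, hp⟩)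
        · exact absurd hc (by simpa using hf c (by simp))
        · rcases f with _ | ⟨e, f'⟩
          · rfl
          · rcases hp with ⟨t, ht⟩
            simp only [List.cons_append, List.cons.injEq] at ht
            have he : e = c := ht.1
            exact absurd hc (by rw [← he]; simpa using hf e (by simp))
    · simp only [if_neg hc]
      rcases f with _ | ⟨e, f'⟩
      · constructor
        · intro h; exact absurd h (by simp)
        · rintro (h | ⟨d, hd, hp⟩)
          · exact absurd h (by simp)
          · rcases hp with ⟨t, ht⟩
            simp only [List.nil_append, List.cons_append, List.cons.injEq] at ht
            exact absurd (ht.1 ▸ hd) hc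
      · have hf' : ∀ x ∈ f', pvIsSep x = false := fun x hx => hf x (by simp [hx])
        constructor
        · intro h
          simp only [List.cons.injEq] at h
          obtain ⟨rfl, h2⟩ := h
          rcases (ih f' hf').mp h2 with h3 | ⟨d, hd, t, ht⟩
          · exact Or.inl (by rw [h3])
          · exact Or.inr ⟨d, hd, t, by simp [← ht]⟩
        · rintro (h | ⟨d, hd, t, ht⟩)
          · simp only [List.cons.injEq] at h
            obtain ⟨rfl, rfl⟩ := h
            simp only [List.cons.injEq, true_and]
            exact (ih _ hf').mpr (Or.inl rfl)
          · simp only [List.cons_append, List.cons.injEq] at ht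
            obtain ⟨rfl, ht⟩ := ht
            simp only [List.cons.injEq, true_and]
            exact (ih f' hf').mpr (Or.inr ⟨d, hd, t, ht⟩)

lemma pvSepFree (l : List Char) (h : l.all (fun c => !pvIsSep c) = true) :
    ∀ c ∈ l, pvIsSep c = false := by
  intro c hc
  simpa using List.all_eq_true.mp h c hc

lemma pvSep_exists (f n : List Char) :
    (∃ c, pvIsSep c = true ∧ (f ++ [c]) <+: n) ↔
      ((f ++ ['-']) <+: n ∨ (f ++ ['.']) <+: n ∨ (f ++ ['_']) <+: n) := by
  constructor
  · rintro ⟨c, hc, hp⟩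
    simp only [pvIsSep, Bool.or_eq_true, decide_eq_true_eq] at hc
    obtain (rfl | rfl) | rfl := hc
    · exact Or.inl hp
    · exact Or.inr (Or.inl hp)
    · exact Or.inr (Or.inr hp)
  · rintro (h | h | h)
    · exact ⟨'-', by decide, h⟩
    · exact ⟨'.', by decide, h⟩
    · exact ⟨'_', by decide, h⟩

-- A's per-family test holds exactly when the leading token is that family
lemma pvCondA_iff (f s : String) (hf : ∀ c ∈ f.toList, pvIsSep c = false) :
    ((decide (s = f) || PySem.Str.startswith s (f ++ "-") || PySem.Str.startswith s (f ++ ".") || PySem.Str.startswith s (f ++ "_")) = true)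
      ↔ pvFirstToken s.toList = f.toList := by
  rw [pvFT_eq_iff _ _ hf, pvSep_exists]
  simp only [Bool.or_eq_true, decide_eq_true_eq, PySem.Str.startswith_eq,
    PySem.Chars.startswith_iff, String.toList_append, String.ext_iff]
  have h1 : ("-" : String).toList = ['-'] := rfl
  have h2 : ("." : String).toList = ['.'] := rfl
  have h3 : ("_" : String).toList = ['_'] := rfl
  rw [h1, h2, h3]
  tauto

lemma pvLoop_eq (s : String) :
    pvFamLoop s ["tiny", "base", "small", "medium", "large", "turbo"] =
      (if String.ofList (pvFirstToken s.toList) ∈ (["tiny", "base", "small", "medium", "large", "turbo"] : List String)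
       then String.ofList (pvFirstToken s.toList) else "default") := by
  have step : ∀ (f : String), pvFirstToken s.toList = f.toList →
      String.ofList (pvFirstToken s.toList) = f := by
    intro f h; rw [h, String.ofList_toList]
  by_cases t1 : pvFirstToken s.toList = ("tiny" : String).toList
  · rw [pvFamLoop, if_pos ((pvCondA_iff _ s (pvSepFree _ (by rfl))).mpr t1), step _ t1]; simp
  by_cases t2 : pvFirstToken s.toList = ("base" : String).toList
  · rw [pvFamLoop, if_neg ((pvCondA_iff _ s (pvSepFree _ (by rfl))).not.mpr t1),
      pvFamLoop, if_pos ((pvCondA_iff _ s (pvSepFree _ (by rfl))).mpr t2), step _ t2]; simp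
  by_cases t3 : pvFirstToken s.toList = ("small" : String).toList
  · rw [pvFamLoop, if_neg ((pvCondA_iff _ s (pvSepFree _ (by rfl))).not.mpr t1),
      pvFamLoop, if_neg ((pvCondA_iff _ s (pvSepFree _ (by rfl))).not.mpr t2),
      pvFamLoop, if_pos ((pvCondA_iff _ s (pvSepFree _ (by rfl))).mpr t3), step _ t3]; simp
  by_cases t4 : pvFirstToken s.toList = ("medium" : String).toList
  · rw [pvFamLoop, if_neg ((pvCondA_iff _ s (pvSepFree _ (by rfl))).not.mpr t1),
      pvFamLoop, if_neg ((pvCondA_iff _ s (pvSepFree _ (by rfl))).not.mpr t2),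
      pvFamLoop, if_neg ((pvCondA_iff _ s (pvSepFree _ (by rfl))).not.mpr t3),
      pvFamLoop, if_pos ((pvCondA_iff _ s (pvSepFree _ (by rfl))).mpr t4), step _ t4]; simp
  by_cases t5 : pvFirstToken s.toList = ("large" : String).toList
  · rw [pvFamLoop, if_neg ((pvCondA_iff _ s (pvSepFree _ (by rfl))).not.mpr t1),
      pvFamLoop, if_neg ((pvCondA_iff _ s (pvSepFree _ (by rfl))).not.mpr t2),
      pvFamLoop, if_neg ((pvCondA_iff _ s (pvSepFree _ (by rfl))).not.mpr t3),
      pvFamLoop, if_neg ((pvCondA_iff _ s (pvSepFree _ (by rfl))).not.mpr t4),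
      pvFamLoop, if_pos ((pvCondA_iff _ s (pvSepFree _ (by rfl))).mpr t5), step _ t5]; simp
  by_cases t6 : pvFirstToken s.toList = ("turbo" : String).toList
  · rw [pvFamLoop, if_neg ((pvCondA_iff _ s (pvSepFree _ (by rfl))).not.mpr t1),
      pvFamLoop, if_neg ((pvCondA_iff _ s (pvSepFree _ (by rfl))).not.mpr t2),
      pvFamLoop, if_neg ((pvCondA_iff _ s (pvSepFree _ (by rfl))).not.mpr t3),
      pvFamLoop, if_neg ((pvCondA_iff _ s (pvSepFree _ (by rfl))).not.mpr t4),
      pvFamLoop, if_neg ((pvCondA_iff _ s (pvSepFree _ (by rfl))).not.mpr t5),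
      pvFamLoop, if_pos ((pvCondA_iff _ s (pvSepFree _ (by rfl))).mpr t6), step _ t6]; simp
  · have hnot : String.ofList (pvFirstToken s.toList) ∉
        (["tiny", "base", "small", "medium", "large", "turbo"] : List String) := by
      intro hmem
      simp only [List.mem_cons, List.not_mem_nil, or_false] at hmem
      rcases hmem with h | h | h | h | h | h
      exacts [t1 (by rw [← String.toList_ofList (l := pvFirstToken s.toList), h]),
        t2 (by rw [← String.toList_ofList (l := pvFirstToken s.toList), h]),
        t3 (by rw [← String.toList_ofList (l := pvFirstToken s.toList), h]),
        t4 (by rw [← String.toList_ofList (l := pvFirstToken s.toList), h]),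
        t5 (by rw [← String.toList_ofList (l := pvFirstToken s.toList), h]),
        t6 (by rw [← String.toList_ofList (l := pvFirstToken s.toList), h])]
    rw [pvFamLoop, if_neg ((pvCondA_iff _ s (pvSepFree _ (by rfl))).not.mpr t1),
      pvFamLoop, if_neg ((pvCondA_iff _ s (pvSepFree _ (by rfl))).not.mpr t2),
      pvFamLoop, if_neg ((pvCondA_iff _ s (pvSepFree _ (by rfl))).not.mpr t3),
      pvFamLoop, if_neg ((pvCondA_iff _ s (pvSepFree _ (by rfl))).not.mpr t4),
      pvFamLoop, if_neg ((pvCondA_iff _ s (pvSepFree _ (by rfl))).not.mpr t5),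
      pvFamLoop, if_neg ((pvCondA_iff _ s (pvSepFree _ (by rfl))).not.mpr t6),
      pvFamLoop, if_neg hnot]

-- ===== VERDICT (by name: the statement is the Claim_ definition above) =====
theorem normalize_model_family_spec : Claim_equal_normalize_model_family := by
  intro s _
  unfold Spec_normalize_model_family normalize_model_family normalize_model_family_alt
  exact pvLoop_eq _
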